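-- pv_equiv track=rewrite | github.com/gebgebgeb/itg-difficulty | augment.py | precompute_features
-- ===== SOURCE A (Python) =====
-- def has_step(line):
--     return any([x in line for x in ['1','2','4']])
--
-- def is_stream(measure):
--     if all([has_step(line) for line in measure]):
--         if len(measure) >= 12:
--             return True
--     return False
--
-- def is_rest(measure):
--     if sum([has_step(line) for line in measure]) <= 8:
--         return True
--     return False
--
-- def is_interesting(measure):
--     if len(measure) - sum([has_step(line) for line in measure]) <= 2:
--         return False
--     if is_rest(measure):
--         return False
--     return True
--
-- def precompute_features(measures):
--     output = {}
--     num_measures = 0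
--     num_notes = 0
--     for measure in measures:
--         for line in measure:
--             num_notes += sum([x in ['1', '2', '4'] for x in line])
--         num_measures += 1
--     output['num_notes'] = num_notes
--     output['num_measures'] = num_measures
--
--     num_measures_stream = 0
--     num_measures_rest = 0
--     num_measures_interesting = 0
--     longest_stream = 0
--     cur_stream = 0
--     for measure in measures:
--         if is_stream(measure):
--             num_measures_stream += 1
--             cur_stream += 1
--         else:
--             if cur_stream > longest_stream:
--                 longest_stream = cur_stream
--             cur_stream = 0
--         if is_rest(measure):
--             num_measures_rest += 1
--         if is_interesting(measure):
--             num_measures_interesting += 1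
--     output['num_measures_stream'] = num_measures_stream
--     output['num_measures_rest'] = num_measures_rest
--     output['num_measures_interesting'] = num_measures_interesting
--     output['longest_stream'] = longest_stream
--
--     strm_res = {}
--     for measure in measures:
--         if is_stream(measure):
--             strm_res[len(measure)] = strm_res.setdefault(len(measure), 0) + 1
--     if strm_res:
--         most_common_res = sorted(strm_res, key=strm_res.get)[-1]
--     else:
--         most_common_res = 0
--     output['most_common_strm_res'] = most_common_res
--     return output
-- ===== SOURCE B (Python) =====
-- def precompute_features(measures):
--     # One pass per measure: (length, #lines containing a step char, #step chars).
--     feats = []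
--     for m in measures:
--         step_lines = 0
--         notes = 0
--         for line in m:
--             k = sum(c in ['1', '2', '4'] for c in line)
--             notes += k
--             if k:
--                 step_lines += 1
--         feats.append((len(m), step_lines, notes))
--
--     num_measures = len(feats)
--     num_notes = sum(n for (_, _, n) in feats)
--
--     num_stream = 0
--     num_rest = 0
--     num_interesting = 0
--     longest_stream = 0
--     cur_stream = 0
--     strm_res = {}
--     for (length, step_lines, _) in feats:
--         if step_lines == length and length >= 12:
--             num_stream += 1
--             cur_stream += 1
--             strm_res[length] = strm_res.get(length, 0) + 1
--         else:
--             if cur_stream > longest_stream: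
--                 longest_stream = cur_stream
--             cur_stream = 0
--         if step_lines <= 8:
--             num_rest += 1
--         if length - step_lines > 2 and step_lines > 8:
--             num_interesting += 1
--
--     if strm_res:
--         most_common_res = sorted(strm_res, key=strm_res.get)[-1]
--     else:
--         most_common_res = 0
--
--     return {
--         'num_notes': num_notes,
--         'num_measures': num_measures,
--         'num_measures_stream': num_stream,
--         'num_measures_rest': num_rest,
--         'num_measures_interesting': num_interesting,
--         'longest_stream': longest_stream,
--         'most_common_strm_res': most_common_res,
--     }
-- ===== Notes on version B (the rewrite author's own statement) =====
-- stated objective: faster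
-- what changed: B makes one pass computing a per-measure table (length, step-line count, step-char count) and derives all statistics by arithmetic on that table, replacing A's three loops whose helper predicates rescan every line of each measure several times.
import Mathlib
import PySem

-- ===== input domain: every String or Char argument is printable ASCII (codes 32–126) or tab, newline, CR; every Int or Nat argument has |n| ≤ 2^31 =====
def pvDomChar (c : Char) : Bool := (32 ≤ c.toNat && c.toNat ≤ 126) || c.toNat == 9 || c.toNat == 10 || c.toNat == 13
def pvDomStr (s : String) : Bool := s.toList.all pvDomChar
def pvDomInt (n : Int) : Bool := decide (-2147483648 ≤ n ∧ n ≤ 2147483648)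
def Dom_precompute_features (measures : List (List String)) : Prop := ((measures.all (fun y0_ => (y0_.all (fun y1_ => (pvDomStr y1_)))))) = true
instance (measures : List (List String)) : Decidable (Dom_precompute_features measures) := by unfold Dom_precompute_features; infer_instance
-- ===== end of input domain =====

-- B replaces A's three loops and line-rescanning helper predicates with one per-measure stats
-- table (length, step-line count, step-char count) and arithmetic on it (objective: simpler).

-- ===== PORT A =====
def hasStep (line : String) : Bool :=
  (["1", "2", "4"].map (fun x => PySem.Str.isIn x line)).any (fun b => b)

def isStream (measure : List String) : Bool :=
  if (measure.map (fun line => hasStep line)).all (fun b => b) then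
    if 12 ≤ measure.length then true else false
  else false

def isRest (measure : List String) : Bool :=
  if (measure.map (fun line => if hasStep line then (1 : Int) else 0)).sum ≤ 8 then true else false

def isInteresting (measure : List String) : Bool :=
  if (measure.length : Int) - (measure.map (fun line => if hasStep line then (1 : Int) else 0)).sum ≤ 2 then false
  else if isRest measure then false
  else true

def stepA1 (s : Int × Int) (measure : List String) : Int × Int :=
  (measure.foldl (fun nn line =>
      nn + (line.toList.map (fun x => if x ∈ (['1', '2', '4'] : List Char) then (1 : Int) else 0)).sum) s.1,
   s.2 + 1)

def stepA2 (s : Int × Int × Int × Int × Int) (measure : List String) : Int × Int × Int × Int × Int :=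
  let (ns, nr, ni, ls, cs) := s
  let (ns, ls, cs) := if isStream measure then (ns + 1, ls, cs + 1)
    else (ns, if cs > ls then cs else ls, 0)
  let nr := if isRest measure then nr + 1 else nr
  let ni := if isInteresting measure then ni + 1 else ni
  (ns, nr, ni, ls, cs)

def stepA3 (d : PySem.Dict Int Int) (measure : List String) : PySem.Dict Int Int :=
  if isStream measure then
    let v := (d.get? (measure.length : Int)).getD 0
    (d.setdefault (measure.length : Int) 0).insert (measure.length : Int) (v + 1)
  else d

def mostCommon (strm_res : PySem.Dict Int Int) : Int :=
  if strm_res.size ≠ 0 then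
    PySem.List.pyGetD (PySem.List.sorted strm_res.keys (fun k => strm_res.getD k 0) false) (-1) 0
  else 0

def precompute_features (measures : List (List String)) : List (String × Int) :=
  let s1 := measures.foldl stepA1 (0, 0)
  let s2 := measures.foldl stepA2 (0, 0, 0, 0, 0)
  let strm_res := measures.foldl stepA3 PySem.Dict.empty
  [("num_notes", s1.1), ("num_measures", s1.2),
   ("num_measures_stream", s2.1), ("num_measures_rest", s2.2.1),
   ("num_measures_interesting", s2.2.2.1), ("longest_stream", s2.2.2.2.1),
   ("most_common_strm_res", mostCommon strm_res)]


-- ===== PORT B =====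
def featB (m : List String) : Int × Int × Int :=
  let r := m.foldl (fun (s : Int × Int) line =>
      let k := (line.toList.map (fun x => if x ∈ (['1', '2', '4'] : List Char) then (1 : Int) else 0)).sum
      (s.1 + (if k ≠ 0 then 1 else 0), s.2 + k)) (0, 0)
  ((m.length : Int), r.1, r.2)

def stepB (s : Int × Int × Int × Int × Int × PySem.Dict Int Int) (f : Int × Int × Int) :
    Int × Int × Int × Int × Int × PySem.Dict Int Int :=
  let (ns, nr, ni, ls, cs, d) := s
  let (ns, ls, cs, d) :=
    if f.2.1 = f.1 ∧ 12 ≤ f.1 then (ns + 1, ls, cs + 1, d.insert f.1 (d.getD f.1 0 + 1))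
    else (ns, if cs > ls then cs else ls, 0, d)
  let nr := if f.2.1 ≤ 8 then nr + 1 else nr
  let ni := if 2 < f.1 - f.2.1 ∧ 8 < f.2.1 then ni + 1 else ni
  (ns, nr, ni, ls, cs, d)

def precompute_features_alt (measures : List (List String)) : List (String × Int) :=
  let feats := measures.map featB
  let num_notes := (feats.map (fun f => f.2.2)).sum
  let r := feats.foldl stepB (0, 0, 0, 0, 0, PySem.Dict.empty)
  let strm_res := r.2.2.2.2.2
  let most :=
    if strm_res.size ≠ 0 then
      PySem.List.pyGetD (PySem.List.sorted strm_res.keys (fun k => strm_res.getD k 0) false) (-1) 0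
    else 0
  [("num_notes", num_notes), ("num_measures", (feats.length : Int)),
   ("num_measures_stream", r.1), ("num_measures_rest", r.2.1),
   ("num_measures_interesting", r.2.2.1), ("longest_stream", r.2.2.2.1),
   ("most_common_strm_res", most)]


-- ===== PRECONDITION & SPEC =====
def Spec_precompute_features (measures : List (List String)) (out : List (String × Int)) : Prop := out = precompute_features_alt measures
instance (measures : List (List String)) (out : List (String × Int)) : Decidable (Spec_precompute_features measures out) := by unfold Spec_precompute_features; infer_instance

-- ===== CLAIM (what is proved, stated in full; the proofs are below) =====
def Claim_equal_precompute_features : Prop := ∀ (measures : List (List String)), Dom_precompute_features measures → Spec_precompute_features measures (precompute_features measures)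

-- ===== LEMMAS AND PROOFS =====
def stepChars (line : String) : Int :=
  (line.toList.map (fun x => if x ∈ (['1', '2', '4'] : List Char) then (1 : Int) else 0)).sum

def stepLines (m : List String) : Nat := m.countP hasStep

lemma stepChars_eq (line : String) :
    stepChars line = (line.toList.countP (fun x => decide (x ∈ (['1', '2', '4'] : List Char))) : Int) := by
  rw [← PySem.List.sum_map_ite_one_zero]; simp [stepChars]

lemma hasStep_iff (line : String) :
    hasStep line = true ↔ ∃ x ∈ line.toList, x ∈ (['1', '2', '4'] : List Char) := by
  have h1 : ("1" : String).toList = ['1'] := rfl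
  have h2 : ("2" : String).toList = ['2'] := rfl
  have h4 : ("4" : String).toList = ['4'] := rfl
  unfold hasStep
  simp only [List.map_cons, List.map_nil, List.any_cons, List.any_nil, Bool.or_eq_true,
    Bool.or_false, PySem.Str.isIn_eq, h1, h2, h4,
    PySem.Chars.isIn_iff_infix, List.singleton_infix_iff]
  constructor
  · rintro (h | h | h) <;> exact ⟨_, h, by simp⟩
  · rintro ⟨x, hx, hm⟩
    simp only [List.mem_cons, List.not_mem_nil, or_false] at hm
    rcases hm with rfl | rfl | rfl <;> simp [hx]

lemma stepChars_ne_zero (line : String) : (stepChars line ≠ 0) ↔ hasStep line = true := by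
  rw [stepChars_eq, hasStep_iff]
  rw [ne_eq, Int.natCast_eq_zero, List.countP_eq_zero]
  push Not
  constructor
  · rintro ⟨x, hx, hm⟩; exact ⟨x, hx, by simpa using hm⟩
  · rintro ⟨x, hx, hm⟩; exact ⟨x, hx, by simpa using hm⟩

lemma indSum (m : List String) :
    (m.map (fun line => if hasStep line then (1 : Int) else 0)).sum = (stepLines m : Int) := by
  rw [PySem.List.sum_map_ite_one_zero]; rfl

lemma isStream_iff (m : List String) :
    isStream m = true ↔ ((stepLines m : Int) = (m.length : Int) ∧ 12 ≤ (m.length : Int)) := by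
  unfold isStream
  split_ifs with h1 h2
  · simp only [true_iff]
    refine ⟨?_, by exact_mod_cast h2⟩
    have : stepLines m = m.length := by
      rw [stepLines, List.countP_eq_length]
      intro a ha
      simpa using (List.all_eq_true.mp (by simpa using h1)) a ha
    exact_mod_cast this
  · simp only [false_iff, not_and]
    intro _; omega
  · simp only [false_iff, not_and]
    intro hc
    have : stepLines m = m.length := by exact_mod_cast hc
    exfalso
    apply h1
    simp only [List.all_map, List.all_eq_true]
    rw [stepLines, List.countP_eq_length] at this
    intro a ha; simpa using this a ha

lemma isRest_iff (m : List String) : isRest m = true ↔ (stepLines m : Int) ≤ 8 := by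
  unfold isRest
  rw [indSum]
  split_ifs with h <;> simp [h]

lemma isInteresting_iff (m : List String) :
    isInteresting m = true ↔ (2 < (m.length : Int) - (stepLines m : Int) ∧ 8 < (stepLines m : Int)) := by
  unfold isInteresting
  rw [indSum]
  have hr := isRest_iff m
  split_ifs with h1 h2
  · simp only [false_iff, not_and]; omega
  · simp only [false_iff, not_and]
    intro _
    have := hr.mp h2
    omega
  · simp only [true_iff]
    constructor
    · omega
    · by_contra hc
      exact h2 (hr.mpr (by omega))

lemma featB_fold (m : List String) (a b : Int) :
    m.foldl (fun (s : Int × Int) line =>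
      let k := (line.toList.map (fun x => if x ∈ (['1', '2', '4'] : List Char) then (1 : Int) else 0)).sum
      (s.1 + (if k ≠ 0 then 1 else 0), s.2 + k)) (a, b)
    = (a + (stepLines m : Int), b + (m.map stepChars).sum) := by
  induction m generalizing a b with
  | nil => simp [stepLines]
  | cons l t ih =>
    simp only [List.foldl_cons, ih, List.map_cons, List.sum_cons]
    have hk : (l.toList.map (fun x => if x ∈ (['1', '2', '4'] : List Char) then (1 : Int) else 0)).sum = stepChars l := rfl
    rw [hk]
    have hsl : stepLines (l :: t) = stepLines t + (if hasStep l then 1 else 0) := by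
      simp [stepLines, List.countP_cons]
    rw [hsl]
    by_cases h : hasStep l
    · have hnz : stepChars l ≠ 0 := (stepChars_ne_zero l).mpr h
      rw [if_pos h, if_pos hnz, Prod.mk.injEq]
      constructor <;> push_cast <;> ring
    · have hnz : ¬ (stepChars l ≠ 0) := fun hc => h ((stepChars_ne_zero l).mp hc)
      rw [if_neg h, if_neg hnz, Prod.mk.injEq]
      constructor <;> push_cast <;> ring

lemma featB_eq (m : List String) :
    featB m = ((m.length : Int), (stepLines m : Int), (m.map stepChars).sum) := by
  unfold featB
  rw [featB_fold]
  simp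

lemma dict_step (d : PySem.Dict Int Int) (L : Int) :
    (d.setdefault L 0).insert L ((d.get? L).getD 0 + 1) = d.insert L (d.getD L 0 + 1) := by
  by_cases h : d.contains L = true
  · rw [PySem.Dict.setdefault_of_contains d 0 h, PySem.Dict.getD_eq_get?_getD]
  · have h' : d.contains L = false := by simpa using h
    rw [PySem.Dict.setdefault_of_not_contains d 0 h', PySem.Dict.insert_insert_self,
      PySem.Dict.getD_of_not_contains d 0 h',
      (PySem.Dict.get?_eq_none_iff_contains d L).mpr h']
    rfl

lemma stepB_featB (m : List String) (s : Int × Int × Int × Int × Int × PySem.Dict Int Int) :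
    stepB s (featB m) =
      (let t := stepA2 (s.1, s.2.1, s.2.2.1, s.2.2.2.1, s.2.2.2.2.1) m
       (t.1, t.2.1, t.2.2.1, t.2.2.2.1, t.2.2.2.2, stepA3 s.2.2.2.2.2 m)) := by
  obtain ⟨ns, nr, ni, ls, cs, d⟩ := s
  rw [featB_eq]
  simp only [stepB, stepA2, stepA3]
  by_cases hs : isStream m = true
  · have hc := (isStream_iff m).mp hs
    rw [if_pos hc, if_pos hs, if_pos hs]
    by_cases hr : isRest m = true
    · have hrc := (isRest_iff m).mp hr
      rw [if_pos hrc, if_pos hr]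
      by_cases hi : isInteresting m = true
      · have hic := (isInteresting_iff m).mp hi
        rw [if_pos hic, if_pos hi, dict_step]
      · have hic : ¬ (2 < (m.length : Int) - (stepLines m : Int) ∧ 8 < (stepLines m : Int)) :=
          fun hc' => hi ((isInteresting_iff m).mpr hc')
        rw [if_neg hic, if_neg hi, dict_step]
    · have hrc : ¬ ((stepLines m : Int) ≤ 8) := fun hc' => hr ((isRest_iff m).mpr hc')
      rw [if_neg hrc, if_neg hr]
      by_cases hi : isInteresting m = true
      · have hic := (isInteresting_iff m).mp hi
        rw [if_pos hic, if_pos hi, dict_step]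
      · have hic : ¬ (2 < (m.length : Int) - (stepLines m : Int) ∧ 8 < (stepLines m : Int)) :=
          fun hc' => hi ((isInteresting_iff m).mpr hc')
        rw [if_neg hic, if_neg hi, dict_step]
  · have hc : ¬ ((stepLines m : Int) = (m.length : Int) ∧ 12 ≤ (m.length : Int)) :=
      fun hc' => hs ((isStream_iff m).mpr hc')
    rw [if_neg hc, if_neg hs, if_neg hs]
    by_cases hr : isRest m = true
    · have hrc := (isRest_iff m).mp hr
      rw [if_pos hrc, if_pos hr]
      by_cases hi : isInteresting m = true
      · have hic := (isInteresting_iff m).mp hi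
        rw [if_pos hic, if_pos hi]
      · have hic : ¬ (2 < (m.length : Int) - (stepLines m : Int) ∧ 8 < (stepLines m : Int)) :=
          fun hc' => hi ((isInteresting_iff m).mpr hc')
        rw [if_neg hic, if_neg hi]
    · have hrc : ¬ ((stepLines m : Int) ≤ 8) := fun hc' => hr ((isRest_iff m).mpr hc')
      rw [if_neg hrc, if_neg hr]
      by_cases hi : isInteresting m = true
      · have hic := (isInteresting_iff m).mp hi
        rw [if_pos hic, if_pos hi]
      · have hic : ¬ (2 < (m.length : Int) - (stepLines m : Int) ∧ 8 < (stepLines m : Int)) :=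
          fun hc' => hi ((isInteresting_iff m).mpr hc')
        rw [if_neg hic, if_neg hi]

lemma fold_eq (ms : List (List String)) (s : Int × Int × Int × Int × Int × PySem.Dict Int Int) :
    (ms.map featB).foldl stepB s =
      (let t := ms.foldl stepA2 (s.1, s.2.1, s.2.2.1, s.2.2.2.1, s.2.2.2.2.1)
       (t.1, t.2.1, t.2.2.1, t.2.2.2.1, t.2.2.2.2, ms.foldl stepA3 s.2.2.2.2.2)) := by
  induction ms generalizing s with
  | nil => rfl
  | cons m t ih =>
    simp only [List.map_cons, List.foldl_cons]
    rw [stepB_featB, ih]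

lemma loop1_eq (ms : List (List String)) (a b : Int) :
    ms.foldl stepA1 (a, b) = (a + (ms.map (fun m => (m.map stepChars).sum)).sum, b + (ms.length : Int)) := by
  induction ms generalizing a b with
  | nil => simp
  | cons m t ih =>
    simp only [List.foldl_cons, List.map_cons, List.sum_cons, List.length_cons]
    have hin : m.foldl (fun nn line =>
        nn + (line.toList.map (fun x => if x ∈ (['1', '2', '4'] : List Char) then (1 : Int) else 0)).sum) a
        = a + (m.map stepChars).sum := PySem.List.foldl_add m stepChars a
    have h1 : stepA1 (a, b) m = (a + (m.map stepChars).sum, b + 1) := by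
      unfold stepA1; rw [hin]
    rw [h1, ih, Prod.mk.injEq]
    constructor <;> push_cast <;> ring

lemma ports_eq (ms : List (List String)) : precompute_features ms = precompute_features_alt ms := by
  unfold precompute_features precompute_features_alt
  dsimp only []
  rw [fold_eq, loop1_eq]
  simp only [List.map_map, List.length_map, zero_add, Function.comp_def, mostCommon]
  simp [featB_eq]


-- ===== VERDICT (by name: the statement is the Claim_ definition above) =====
theorem precompute_features_spec : Claim_equal_precompute_features := by
  intro measures _
  unfold Spec_precompute_features
  exact ports_eq measures
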